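-- pv_equiv track=rewrite | github.com/narimiran/checkio | node-crucial.py | most_crucial
-- ===== SOURCE A (Python) =====
-- from collections import defaultdict
--
-- def most_crucial(net, users):
--     def subnetworks(crush):
--         score = users[crush]
--         total_visited = set()
--         alive = {node for connection in net for node in connection
--                  if node != crush}
--
--         for start in alive:
--             if start not in total_visited:
--                 visited = set()
--                 stack = {start}
--                 while stack:
--                     current = stack.pop()
--                     visited |= {current}
--                     for left, right in net:
--                         if right == current:
--                             left, right = right, left
--                         if left == current and right not in visited | {crush}:
--                             stack |= {right}
--                 total_visited |= visited
--                 score += sum(v for k, v in users.items() if k in visited) ** 2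
--         return score
--
--     results = defaultdict(list)
--     for k in users.keys():
--         results[subnetworks(k)].append(k)
--     return results[min(results)]
-- ===== SOURCE B (Python) =====
-- def most_crucial(net, users):
--     # Build the adjacency index once, so no per-node scan of the whole net is needed.
--     adj = {}
--     for a, b in net:
--         adj.setdefault(a, []).append(b)
--         adj.setdefault(b, []).append(a)
--
--     def component_score(crush):
--         score = users[crush]
--         seen = set()
--         alive = {n for edge in net for n in edge if n != crush}
--         for start in alive:
--             if start in seen:
--                 continue
--             comp = set()
--             stack = {start}
--             while stack:
--                 cur = stack.pop()
--                 comp.add(cur)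
--                 for nb in adj[cur]:
--                     if nb != crush and nb not in comp:
--                         stack.add(nb)
--             seen |= comp
--             score += sum(users.get(k, 0) for k in comp) ** 2
--         return score
--
--     best = None
--     winners = []
--     for k in users:
--         s = component_score(k)
--         if best is None or s < best:
--             best, winners = s, [k]
--         elif s == best:
--             winners.append(k)
--     return winners
-- ===== Notes on version B (the rewrite author's own statement) =====
-- stated objective: faster
-- what changed: B builds an adjacency dict once so each popped node looks up its neighbours instead of A's rescan of the whole edge list per pop, sums each component's user values by iterating the component instead of scanning all of users.items(), and replaces A's defaultdict grouping plus min() with a single-pass running minimum.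
import Mathlib
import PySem

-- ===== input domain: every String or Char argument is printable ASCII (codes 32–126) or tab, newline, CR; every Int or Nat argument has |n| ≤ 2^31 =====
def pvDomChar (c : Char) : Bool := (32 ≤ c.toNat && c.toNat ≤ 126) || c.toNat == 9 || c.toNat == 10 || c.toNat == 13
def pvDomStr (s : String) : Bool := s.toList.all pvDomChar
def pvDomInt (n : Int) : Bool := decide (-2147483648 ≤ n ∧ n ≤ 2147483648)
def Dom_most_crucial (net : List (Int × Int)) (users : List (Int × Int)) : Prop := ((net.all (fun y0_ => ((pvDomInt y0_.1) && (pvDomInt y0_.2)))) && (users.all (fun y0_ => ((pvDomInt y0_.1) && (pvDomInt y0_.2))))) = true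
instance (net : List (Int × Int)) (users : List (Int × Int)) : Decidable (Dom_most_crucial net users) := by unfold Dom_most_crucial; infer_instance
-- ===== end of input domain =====

-- B replaces A's per-popped-node rescan of the whole net by an adjacency index built once, and A's
-- defaultdict grouping + min() by a single-pass running minimum; equal return values proved on Pre_ (users ≠ {}).

-- ===== PORT A =====
-- one sweep over net for the popped node `current`: "for left, right in net: if right == current: swap;
-- if left == current and right not in visited | {crush}: stack |= {right}"
def pvA_edges (net : List (Int × Int)) (crush current : Int)
    (visited : PySem.Set Int) (stack : PySem.Set Int) : PySem.Set Int :=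
  net.foldl (fun st e =>
    let l := if e.2 == current then e.2 else e.1
    let r := if e.2 == current then e.1 else e.2
    if l == current && !(PySem.Set.contains (PySem.Set.union visited [crush]) r)
    then PySem.Set.union st [r] else st) stack

-- the "while stack:" loop. Python's set.pop() takes an unspecified element (here: the head); the
-- returned visited SET, and hence everything A computes from it, does not depend on that choice.
-- Fuel bounds the iteration count: each iteration visits one fresh node drawn from net's nodes
-- (at most 2*len(net) of them), so fuel 2*len(net)+1 is never exhausted.
def pvA_while (net : List (Int × Int)) (crush : Int) :
    Nat → PySem.Set Int → PySem.Set Int → PySem.Set Int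
  | 0, visited, _ => visited
  | fuel+1, visited, stack =>
    match stack with
    | [] => visited
    | current :: rest =>
      let visited' := PySem.Set.union visited [current]
      pvA_while net crush fuel visited' (pvA_edges net crush current visited' rest)

-- def subnetworks(crush); users[crush] is ported as getD _ 0 (crush is always a key of users)
def pvA_sub (net : List (Int × Int)) (ud : PySem.Dict Int Int) (crush : Int) : Int :=
  let alive : PySem.Set Int :=
    PySem.Set.ofList ((net.flatMap (fun e => [e.1, e.2])).filter (fun n => n != crush))
  (alive.foldl (fun (acc : Int × PySem.Set Int) start =>
      if PySem.Set.contains acc.2 start then acc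
      else
        let visited := pvA_while net crush (2 * net.length + 1) PySem.Set.empty
          (PySem.Set.ofList [start])
        (acc.1 + ((ud.items.filter (fun kv => PySem.Set.contains visited kv.1)).map (·.2)).sum ^ 2,
         PySem.Set.union acc.2 visited))
    (ud.getD crush 0, PySem.Set.empty)).1

def most_crucial (net : List (Int × Int)) (users : List (Int × Int)) : List Int :=
  let ud := PySem.Dict.ofList users
  let results := ud.keys.foldl
    (fun (res : PySem.Dict Int (List Int)) k => res.modify (pvA_sub net ud k) [] (· ++ [k]))
    PySem.Dict.empty
  match PySem.List.min? results.keys (fun s => s) with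
  | none => []            -- min(()) raises ValueError: excluded by Pre_most_crucial
  | some m => results.getD m []

-- ===== PORT B =====
-- adjacency index, built once: adj.setdefault(a, []).append(b); adj.setdefault(b, []).append(a)
def pvB_adj (net : List (Int × Int)) : PySem.Dict Int (List Int) :=
  net.foldl (fun d e => (d.modify e.1 [] (· ++ [e.2])).modify e.2 [] (· ++ [e.1]))
    PySem.Dict.empty

-- "while stack:" with neighbours looked up in adj instead of scanning net (same set.pop() remark
-- and fuel bound as in pvA_while)
def pvB_while (adj : PySem.Dict Int (List Int)) (crush : Int) :
    Nat → PySem.Set Int → PySem.Set Int → PySem.Set Int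
  | 0, comp, _ => comp
  | fuel+1, comp, stack =>
    match stack with
    | [] => comp
    | cur :: rest =>
      let comp' := PySem.Set.add comp cur
      pvB_while adj crush fuel comp'
        ((adj.getD cur []).foldl (fun st nb =>
            if nb != crush && !(PySem.Set.contains comp' nb) then PySem.Set.add st nb else st)
          rest)

-- def component_score(crush); users[crush] ported as getD _ 0 (crush is always a key);
-- sum(users.get(k, 0) for k in comp) iterates the comp set — its value is order-independent
def pvB_score (net : List (Int × Int)) (adj : PySem.Dict Int (List Int))
    (ud : PySem.Dict Int Int) (crush : Int) : Int :=
  let alive : PySem.Set Int :=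
    PySem.Set.ofList ((net.flatMap (fun e => [e.1, e.2])).filter (fun n => n != crush))
  (alive.foldl (fun (acc : Int × PySem.Set Int) start =>
      if PySem.Set.contains acc.2 start then acc
      else
        let comp := pvB_while adj crush (2 * net.length + 1) PySem.Set.empty
          (PySem.Set.ofList [start])
        (acc.1 + (comp.map (fun k => ud.getD k 0)).sum ^ 2,
         PySem.Set.union acc.2 comp))
    (ud.getD crush 0, PySem.Set.empty)).1

-- single-pass running minimum over the users in key order
def most_crucial_alt (net : List (Int × Int)) (users : List (Int × Int)) : List Int :=
  let adj := pvB_adj net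
  let ud := PySem.Dict.ofList users
  (ud.keys.foldl (fun (acc : Option Int × List Int) k =>
      let s := pvB_score net adj ud k
      match acc.1 with
      | none => (some s, [k])
      | some m => if s < m then (some s, [k]) else if s = m then (acc.1, acc.2 ++ [k]) else acc)
    (none, [])).2

-- ===== PRECONDITION & SPEC =====
-- Pre_ excludes only the empty users dict, on which A's min() raises ValueError.
def Pre_most_crucial (net : List (Int × Int)) (users : List (Int × Int)) : Prop := users ≠ []
instance (net : List (Int × Int)) (users : List (Int × Int)) : Decidable (Pre_most_crucial net users) := by unfold Pre_most_crucial; infer_instance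
def pvWitness_most_crucial : (List (Int × Int)) × (List (Int × Int)) :=
  ([(1, 2), (2, 3)], [(1, 5), (2, 3), (4, 1)])

def Spec_most_crucial (net : List (Int × Int)) (users : List (Int × Int)) (out : List Int) : Prop := out = most_crucial_alt net users
instance (net : List (Int × Int)) (users : List (Int × Int)) (out : List Int) : Decidable (Spec_most_crucial net users out) := by unfold Spec_most_crucial; infer_instance

-- ===== CLAIM (what is proved, stated in full; the proofs are below) =====
def Claim_equal_most_crucial : Prop := ∀ (net : List (Int × Int)) (users : List (Int × Int)), Dom_most_crucial net users → Pre_most_crucial net users → Spec_most_crucial net users (most_crucial net users)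

-- ===== LEMMAS AND PROOFS =====

-- the candidates A's edge sweep offers to push for `cur`, in net order (B's adj[cur] list)
def pvCand (net : List (Int × Int)) (cur : Int) : List Int :=
  net.flatMap (fun e =>
    (if e.1 = cur then [e.2] else []) ++ (if e.2 = cur then [e.1] else []))

lemma pvB_adj_getD_gen (cur : Int) : ∀ (net : List (Int × Int)) (d : PySem.Dict Int (List Int)),
    (net.foldl (fun d e => (d.modify e.1 [] (· ++ [e.2])).modify e.2 [] (· ++ [e.1])) d).getD cur []
      = d.getD cur [] ++ pvCand net cur
  | [], d => by simp [pvCand]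
  | e :: net, d => by
    rw [List.foldl_cons, pvB_adj_getD_gen cur net]
    simp only [pvCand, List.flatMap_cons, ← List.append_assoc]
    congr 1
    rw [PySem.Dict.getD_modify, PySem.Dict.getD_modify]
    by_cases h2 : cur = e.2 <;> by_cases h1 : cur = e.1 <;>
      (try subst h1) <;> (try subst h2) <;> split_ifs <;>
      simp_all [eq_comm] <;> rw [PySem.Dict.getD_modify] <;> simp_all

lemma pvB_adj_getD (net : List (Int × Int)) (cur : Int) :
    (pvB_adj net).getD cur [] = pvCand net cur := by
  rw [pvB_adj, pvB_adj_getD_gen]; simp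

lemma pv_union_singleton (s : PySem.Set Int) (x : Int) :
    PySem.Set.union s [x] = PySem.Set.add s x := rfl

lemma pv_edges_eq (crush cur : Int) (vis : PySem.Set Int) (hcur : cur ∈ vis) :
    ∀ (net : List (Int × Int)) (st : PySem.Set Int),
    pvA_edges net crush cur vis st =
      (pvCand net cur).foldl (fun st nb =>
        if nb != crush && !(PySem.Set.contains vis nb) then PySem.Set.add st nb else st) st
  | [], st => by simp [pvA_edges, pvCand]
  | e :: net, st => by
    rw [show pvA_edges (e :: net) crush cur vis st = pvA_edges net crush cur vis
          (pvA_edges [e] crush cur vis st) from rfl,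
        pv_edges_eq crush cur vis hcur net]
    simp only [pvCand, List.flatMap_cons, List.foldl_append]
    congr 1
    simp only [pvA_edges, List.foldl_cons, List.foldl_nil, pv_union_singleton]
    by_cases h1 : e.1 = cur <;> by_cases h2 : e.2 = cur <;>
      simp only [h1, h2, if_pos, beq_iff_eq, List.foldl_cons, List.foldl_nil]
    all_goals simp [PySem.Set.mem_add, hcur, bne, Bool.and_comm, eq_comm (b := cur)]
    all_goals (intro h; exact absurd h.symm (by assumption))

lemma pv_while_eq (net : List (Int × Int)) (crush : Int) :
    ∀ (fuel : Nat) (vis st : PySem.Set Int),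
      pvA_while net crush fuel vis st = pvB_while (pvB_adj net) crush fuel vis st
  | 0, vis, st => rfl
  | fuel+1, vis, [] => rfl
  | fuel+1, vis, cur :: rest => by
    show pvA_while net crush fuel (PySem.Set.union vis [cur])
        (pvA_edges net crush cur (PySem.Set.union vis [cur]) rest) = _
    rw [pv_union_singleton,
        pv_edges_eq crush cur (PySem.Set.add vis cur)
          (by simp [PySem.Set.mem_add]) net rest,
        pv_while_eq net crush fuel,
        show pvB_while (pvB_adj net) crush (fuel+1) vis (cur :: rest)
          = pvB_while (pvB_adj net) crush fuel (PySem.Set.add vis cur)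
              (((pvB_adj net).getD cur []).foldl (fun st nb =>
                if nb != crush && !(PySem.Set.contains (PySem.Set.add vis cur) nb)
                then PySem.Set.add st nb else st) rest) from rfl,
        pvB_adj_getD]

lemma pv_vis_nodup (net : List (Int × Int)) (crush : Int) :
    ∀ (fuel : Nat) (vis st : PySem.Set Int), vis.Nodup → (pvA_while net crush fuel vis st).Nodup
  | 0, vis, st, h => h
  | fuel+1, vis, [], h => h
  | fuel+1, vis, cur :: rest, h => by
    show (pvA_while net crush fuel (PySem.Set.union vis [cur])
        (pvA_edges net crush cur (PySem.Set.union vis [cur]) rest)).Nodup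
    rw [pv_union_singleton]
    exact pv_vis_nodup net crush fuel _ _ (PySem.Set.nodup_add vis cur h)

lemma pv_sum_ite (k v : Int) (g : Int → Int) : ∀ (comp : List Int), comp.Nodup →
    (comp.map (fun c => if k == c then v else g c)).sum
      = (if k ∈ comp then v - g k else 0) + (comp.map g).sum
  | [], _ => by simp
  | c :: comp, h => by
    rw [List.map_cons, List.sum_cons, List.map_cons, List.sum_cons,
      pv_sum_ite k v g comp (List.Nodup.of_cons h)]
    have hmem : (k ∈ c :: comp) ↔ (k = c ∨ k ∈ comp) := by simp
    by_cases hkc : k = c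
    · have hk : k ∉ comp := hkc ▸ (List.nodup_cons.mp h).1
      rw [if_pos (beq_iff_eq.mpr hkc), if_neg hk, if_pos (hmem.mpr (Or.inl hkc)), hkc]
      omega
    · rw [if_neg (by simpa using hkc)]
      by_cases hm : k ∈ comp
      · rw [if_pos hm, if_pos (hmem.mpr (Or.inr hm))]
        omega
      · rw [if_neg hm, if_neg (fun hx => (hmem.mp hx).elim hkc hm)]
        omega

lemma pv_compsum : ∀ (its : List (Int × Int)), (its.map (·.1)).Nodup →
    ∀ (comp : List Int), comp.Nodup →
    ((its.filter (fun kv => PySem.Set.contains comp kv.1)).map (·.2)).sum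
      = (comp.map (fun c => (PySem.Dict.mk its).getD c 0)).sum
  | [], _, comp, _ => by
    have h0 : (fun c : Int => ((PySem.Dict.mk ([] : List (Int × Int)) : PySem.Dict Int Int)).getD c 0)
        = fun _ : Int => (0 : Int) := rfl
    simp [h0]
  | (k, v) :: rest, hits, comp, hc => by
    have hkrest : k ∉ rest.map (·.1) := (List.nodup_cons.mp hits).1
    have hrest := pv_compsum rest (List.Nodup.of_cons hits) comp hc
    have hgetD : ∀ c : Int, (PySem.Dict.mk ((k, v) :: rest)).getD c 0
        = if k == c then v else (PySem.Dict.mk rest).getD c 0 := by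
      intro c
      rw [PySem.Dict.getD_eq_get?_getD, PySem.Dict.get?_mk_cons]
      by_cases h : k = c <;> simp [h, PySem.Dict.getD_eq_get?_getD]
    have hg0 : (PySem.Dict.mk rest).getD k 0 = 0 := by
      have hcont : (PySem.Dict.mk rest : PySem.Dict Int Int).contains k = false := by
        simpa [PySem.Dict.contains_eq_decide_mem_keys] using hkrest
      exact PySem.Dict.getD_of_not_contains _ 0 hcont
    simp only [hgetD]
    rw [pv_sum_ite k v (fun c => (PySem.Dict.mk rest).getD c 0) comp hc, hg0,
      List.filter_cons]
    by_cases hm : k ∈ comp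
    · rw [if_pos (by simpa [PySem.Set.contains_iff] using hm)]
      simp only [List.map_cons, List.sum_cons, hrest, if_pos hm]
      omega
    · rw [if_neg (by simpa [PySem.Set.contains_iff] using hm)]
      simp only [hrest, if_neg hm]
      omega

lemma pv_score_eq (net : List (Int × Int)) (ud : PySem.Dict Int Int)
    (hud : ud.keys.Nodup) (crush : Int) :
    pvA_sub net ud crush = pvB_score net (pvB_adj net) ud crush := by
  unfold pvA_sub pvB_score
  have hbody : (fun (acc : Int × PySem.Set Int) start =>
      if PySem.Set.contains acc.2 start then acc
      else
        let visited := pvA_while net crush (2 * net.length + 1) PySem.Set.empty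
          (PySem.Set.ofList [start])
        (acc.1 + ((ud.items.filter (fun kv => PySem.Set.contains visited kv.1)).map (·.2)).sum ^ 2,
         PySem.Set.union acc.2 visited))
      = (fun (acc : Int × PySem.Set Int) start =>
      if PySem.Set.contains acc.2 start then acc
      else
        let comp := pvB_while (pvB_adj net) crush (2 * net.length + 1) PySem.Set.empty
          (PySem.Set.ofList [start])
        (acc.1 + (comp.map (fun k => ud.getD k 0)).sum ^ 2,
         PySem.Set.union acc.2 comp)) := by
    funext acc start
    by_cases hm : start ∈ acc.2
    · rw [if_pos ((PySem.Set.contains_iff _ _).mpr hm),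
        if_pos ((PySem.Set.contains_iff _ _).mpr hm)]
    · rw [if_neg (fun hx => hm ((PySem.Set.contains_iff _ _).mp hx)),
        if_neg (fun hx => hm ((PySem.Set.contains_iff _ _).mp hx))]
      rw [← pv_while_eq]
      dsimp only
      have hnd : (pvA_while net crush (2 * net.length + 1) PySem.Set.empty
          (PySem.Set.ofList [start])).Nodup :=
        pv_vis_nodup net crush _ _ _ List.nodup_nil
      have := pv_compsum ud.items (by simpa [PySem.Dict.keys] using hud)
        (pvA_while net crush (2 * net.length + 1) PySem.Set.empty
          (PySem.Set.ofList [start])) hnd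
      rw [this]
  rw [hbody]

def pvMinStep (acc : Option Int) (x : Int) : Option Int :=
  match acc with
  | none => some x
  | some m => if x < m then some x else some m

lemma pv_min?_foldl_some (l : List Int) : ∀ (a : Int),
    l.foldl pvMinStep (some a) = some (l.foldl min a) := by
  induction l with
  | nil => intro a; rfl
  | cons x l ih =>
    intro a
    have hx : pvMinStep (some a) x = some (min a x) := by
      show (if x < a then some x else some a) = some (min a x)
      rw [min_def]; split_ifs <;> first | rfl | omega
    simp only [List.foldl_cons, hx, ih]

lemma pv_min?_id (l : List Int) : PySem.List.min? l (fun s => s) = l.min? := by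
  have h0 : PySem.List.min? l (fun s => s) = l.foldl pvMinStep none := by
    unfold PySem.List.min?
    congr 1
    funext acc x
    cases acc <;> rfl
  cases l with
  | nil => rfl
  | cons a l =>
    rw [h0, List.foldl_cons, show pvMinStep none a = some a from rfl,
      pv_min?_foldl_some, List.min?_cons']

lemma pv_min?_ofList (l : List Int) :
    PySem.List.min? (PySem.Set.ofList l) (fun s => s) = PySem.List.min? l (fun s => s) := by
  rw [pv_min?_id, pv_min?_id]
  cases l with
  | nil => rfl
  | cons a t =>
    obtain ⟨m, hm⟩ : ∃ m, (a :: t).min? = some m := ⟨_, List.min?_cons'⟩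
    obtain ⟨hmem, hle⟩ := List.min?_eq_some_iff_subtype.mp hm
    rw [hm]
    refine List.min?_eq_some_iff_subtype.mpr ⟨?_, ?_⟩
    · exact (PySem.Set.mem_ofList _ _).mpr hmem
    · intro b hb
      exact hle b ((PySem.Set.mem_ofList _ _).mp hb)

-- proof-side mirror of B's running-minimum step
def pvSel (sc : Int → Int) (acc : Option Int × List Int) (k : Int) : Option Int × List Int :=
  match acc.1 with
  | none => (some (sc k), [k])
  | some m => if sc k < m then (some (sc k), [k])
      else if sc k = m then (acc.1, acc.2 ++ [k]) else acc

lemma pv_foldl_min_le (sc : Int → Int) :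
    ∀ (ks : List Int) (a : Int), ks.foldl (fun a k => min a (sc k)) a ≤ a
  | [], a => le_refl a
  | k :: ks, a =>
    le_trans (pv_foldl_min_le sc ks (min a (sc k))) (min_le_left _ _)

lemma pvSel_acc (sc : Int → Int) : ∀ (ks : List Int) (m : Int) (w : List Int),
    ks.foldl (pvSel sc) (some m, w)
      = (some (ks.foldl (fun a k => min a (sc k)) m),
         (if ks.foldl (fun a k => min a (sc k)) m = m then w else [])
           ++ ks.filter (fun k => sc k == ks.foldl (fun a k => min a (sc k)) m))
  | [], m, w => by simp
  | k :: ks, m, w => by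
    have hM := pv_foldl_min_le sc ks (min m (sc k))
    rw [List.foldl_cons, List.foldl_cons]
    by_cases h1 : sc k < m
    · have hstep : pvSel sc (some m, w) k = (some (sc k), [k]) := by
        simp [pvSel, h1]
      have hmin : min m (sc k) = sc k := by omega
      rw [hstep, pvSel_acc sc ks (sc k) [k], hmin]
      have hne : ks.foldl (fun a k => min a (sc k)) (sc k) ≠ m := by
        rw [hmin] at hM; omega
      rw [if_neg hne, List.filter_cons]
      by_cases h2 : ks.foldl (fun a k => min a (sc k)) (sc k) = sc k
      · rw [if_pos h2, if_pos (by rw [beq_iff_eq]; exact h2.symm),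
          List.singleton_append, List.nil_append]
      · rw [if_neg h2, if_neg (by rw [beq_iff_eq]; exact fun e => h2 e.symm),
          List.nil_append]
    · by_cases h2 : sc k = m
      · have hstep : pvSel sc (some m, w) k = (some m, w ++ [k]) := by
          simp [pvSel, h2]
        have hmin : min m (sc k) = m := by omega
        rw [hstep, pvSel_acc sc ks m (w ++ [k]), hmin]
        by_cases h3 : ks.foldl (fun a k => min a (sc k)) m = m
        · rw [if_pos h3, if_pos h3, List.filter_cons,
            if_pos (by rw [beq_iff_eq]; exact h2.trans h3.symm),
            List.append_assoc, List.singleton_append]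
        · rw [if_neg h3, if_neg h3, List.filter_cons,
            if_neg (by rw [beq_iff_eq]; exact fun e => h3 (e.symm.trans h2)),
            List.nil_append]
      · have hstep : pvSel sc (some m, w) k = (some m, w) := by
          simp [pvSel, h1, h2]
        have hmin : min m (sc k) = m := by omega
        rw [hstep, pvSel_acc sc ks m w, hmin, List.filter_cons]
        have : ¬ (sc k == ks.foldl (fun a k => min a (sc k)) m) = true := by
          rw [hmin] at hM; simp only [beq_iff_eq]; omega
        rw [if_neg this]

lemma pvSel_main (sc : Int → Int) (k : Int) (ks : List Int) :
    ((k :: ks).foldl (pvSel sc) (none, [])).2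
      = (k :: ks).filter (fun j => sc j == ks.foldl (fun a j => min a (sc j)) (sc k)) := by
  rw [List.foldl_cons, show pvSel sc (none, []) k = (some (sc k), [k]) from rfl,
    pvSel_acc sc ks (sc k) [k], List.filter_cons]
  by_cases h : ks.foldl (fun a j => min a (sc j)) (sc k) = sc k
  · rw [if_pos h, if_pos (by rw [beq_iff_eq]; exact h.symm),
      List.singleton_append]
  · rw [if_neg h, if_neg (by rw [beq_iff_eq]; exact fun e => h e.symm),
      List.nil_append]

lemma pvA_group (sc : Int → Int) (ks : List Int) (m : Int) :
    (ks.foldl (fun res k => res.modify (sc k) [] (· ++ [k])) PySem.Dict.empty).getD m []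
      = ks.filter (fun k => sc k == m) := by
  have h := PySem.Dict.getD_foldl_modify_append (ks.map (fun k => ((sc k, k) : Int × Int)))
    PySem.Dict.empty m
  rw [List.foldl_map] at h
  simp only [List.filter_map, List.map_map, Function.comp_def] at h
  simpa using h

lemma pvA_keys (sc : Int → Int) (ks : List Int) :
    (ks.foldl (fun res k => res.modify (sc k) [] (· ++ [k])) PySem.Dict.empty).keys
      = PySem.Set.ofList (ks.map sc) := by
  rw [PySem.Dict.keys_foldl_modify_key ks sc [] (fun _ k => (· ++ [k])),
    show (PySem.Dict.empty : PySem.Dict Int (List Int)).keys = [] from rfl,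
    PySem.Set.update_nil_left]

theorem pv_main_eq (net : List (Int × Int)) (users : List (Int × Int)) (hne : users ≠ []) :
    most_crucial net users = most_crucial_alt net users := by
  have hkeys : (PySem.Dict.ofList users : PySem.Dict Int Int).keys
      = PySem.Set.ofList (users.map (·.1)) := by
    show (users.foldl (fun acc p => acc.insert p.1 p.2) PySem.Dict.empty).keys = _
    rw [PySem.Dict.keys_foldl_insert_key users (·.1) (fun _ p => p.2) PySem.Dict.empty,
      show (PySem.Dict.empty : PySem.Dict Int Int).keys = [] from rfl,
      PySem.Set.update_nil_left]
  have hnenil : (PySem.Dict.ofList users : PySem.Dict Int Int).keys ≠ [] := by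
    rw [hkeys]
    cases users with
    | nil => exact absurd rfl hne
    | cons p ps =>
      rw [List.map_cons, PySem.Set.ofList_cons]
      exact List.cons_ne_nil _ _
  obtain ⟨k, ks, hk⟩ := List.exists_cons_of_ne_nil hnenil
  have hA : most_crucial net users
      = (k :: ks).filter (fun j => pvA_sub net (PySem.Dict.ofList users) j
          == ks.foldl (fun a j => min a (pvA_sub net (PySem.Dict.ofList users) j))
               (pvA_sub net (PySem.Dict.ofList users) k)) := by
    simp only [most_crucial]
    rw [hk, pvA_keys (fun j => pvA_sub net (PySem.Dict.ofList users) j) (k :: ks),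
      pv_min?_ofList, List.map_cons, pv_min?_id, List.min?_cons', List.foldl_map]
    exact pvA_group (fun j => pvA_sub net (PySem.Dict.ofList users) j) (k :: ks) _
  have hB : most_crucial_alt net users
      = (k :: ks).filter (fun j => pvB_score net (pvB_adj net) (PySem.Dict.ofList users) j
          == ks.foldl (fun a j => min a (pvB_score net (pvB_adj net) (PySem.Dict.ofList users) j))
               (pvB_score net (pvB_adj net) (PySem.Dict.ofList users) k)) := by
    simp only [most_crucial_alt]
    rw [hk, show (fun (acc : Option Int × List Int) j =>
        let s := pvB_score net (pvB_adj net) (PySem.Dict.ofList users) j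
        match acc.1 with
        | none => (some s, [j])
        | some m => if s < m then (some s, [j]) else if s = m then (acc.1, acc.2 ++ [j]) else acc)
      = pvSel (fun j => pvB_score net (pvB_adj net) (PySem.Dict.ofList users) j) from rfl,
      pvSel_main]
  rw [hA, hB]
  have hsc : ∀ j, pvA_sub net (PySem.Dict.ofList users) j
      = pvB_score net (pvB_adj net) (PySem.Dict.ofList users) j :=
    pv_score_eq net (PySem.Dict.ofList users) (PySem.Dict.nodup_keys_ofList users)
  simp only [hsc]

-- ===== VERDICT (by name: the statement is the Claim_ definition above) =====
theorem most_crucial_spec : Claim_equal_most_crucial := by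
  intro net users _ hpre
  exact pv_main_eq net users hpre
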